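-- pv_equiv track=rewrite | github.com/skuroda/FindKeyConflicts | find_key_conflicts.py | order_key_string
-- ===== SOURCE A (Python) =====
-- MODIFIERS = ('shift', 'ctrl', 'alt', 'super')
--
-- def order_key_string(key_string):
--     split_keys = key_string.split("+")
--     try:
--         i = split_keys.index("")
--         split_keys[i] = "+"
--         split_keys.remove("")
--     except:
--         pass
--
--     modifiers = []
--     keys = []
--     for key in split_keys:
--         if key in MODIFIERS:
--             modifiers.append(key)
--         else:
--             keys.append(key)
--     modifiers.sort()
--     keys.sort()
--     ordered_key_string = "+".join(modifiers + keys)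
--     return ordered_key_string
-- ===== SOURCE B (Python) =====
-- MODIFIERS = ('shift', 'ctrl', 'alt', 'super')
--
-- def order_key_string(key_string):
--     split_keys = key_string.split("+")
--     if "" in split_keys:
--         i = split_keys.index("")
--         split_keys[i] = "+"
--         if "" in split_keys:
--             split_keys.remove("")
--     # modifiers come first in their fixed sorted order, by counting, no sort needed
--     parts = [m for m in ('alt', 'ctrl', 'shift', 'super')
--              for _ in range(split_keys.count(m))]
--     parts += sorted(k for k in split_keys if k not in MODIFIERS)
--     return "+".join(parts)
-- ===== Notes on version B (the rewrite author's own statement) =====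
-- stated objective: alternative
-- what changed: The partition loop plus two .sort() calls are replaced by counting each of the four modifiers and emitting them in their fixed sorted order, plus one sorted() over the non-modifier keys; the try/except preprocessing becomes explicit membership tests.
import Mathlib
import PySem

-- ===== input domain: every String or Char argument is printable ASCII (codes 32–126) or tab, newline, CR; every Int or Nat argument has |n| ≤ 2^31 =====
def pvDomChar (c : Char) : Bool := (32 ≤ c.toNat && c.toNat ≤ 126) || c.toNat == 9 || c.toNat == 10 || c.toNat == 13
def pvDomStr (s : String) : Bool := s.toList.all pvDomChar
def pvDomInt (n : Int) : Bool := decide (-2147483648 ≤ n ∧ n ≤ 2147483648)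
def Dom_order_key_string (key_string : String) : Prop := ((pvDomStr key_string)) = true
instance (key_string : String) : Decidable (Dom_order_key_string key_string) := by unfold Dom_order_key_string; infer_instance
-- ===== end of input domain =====

-- B replaces A's partition-then-sort-twice by counting the four modifiers (emitting them in fixed sorted order) plus one sort of the remaining keys; return values proved equal, no mutation observable.

-- ===== PORT A =====
def MODIFIERS : List String := ["shift", "ctrl", "alt", "super"]

def order_key_string (key_string : String) : String :=
  let split_keys := (PySem.Str.split? key_string "+").getD []
  -- try: i = index(""); [i] = "+"; remove("") except: pass
  let split_keys :=
    match PySem.List.index? split_keys "" with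
    | none => split_keys
    | some i =>
      let ys := split_keys.set i "+"
      match PySem.List.remove? ys "" with
      | none => ys          -- remove raised ValueError, caught
      | some zs => zs
  let acc := split_keys.foldl
    (fun (acc : List String × List String) key =>
      if MODIFIERS.contains key then (acc.1 ++ [key], acc.2)
      else (acc.1, acc.2 ++ [key])) ([], [])
  let modifiers := PySem.List.sorted acc.1 (fun x => x) false
  let keys := PySem.List.sorted acc.2 (fun x => x) false
  PySem.Str.join "+" (modifiers ++ keys)

-- ===== PORT B =====
def SORTED_MODS : List String := ["alt", "ctrl", "shift", "super"]

def order_key_string_alt (key_string : String) : String :=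
  let split_keys := (PySem.Str.split? key_string "+").getD []
  let split_keys :=
    if split_keys.contains "" then
      let i := (PySem.List.index? split_keys "").getD 0
      let ys := split_keys.set i "+"
      if ys.contains "" then (PySem.List.remove? ys "").getD ys else ys
    else split_keys
  let parts := SORTED_MODS.flatMap (fun m => List.replicate (PySem.List.count split_keys m) m)
  let parts := parts ++
    PySem.List.sorted (split_keys.filter (fun k => !MODIFIERS.contains k)) (fun x => x) false
  PySem.Str.join "+" parts

-- ===== PRECONDITION & SPEC =====
def Spec_order_key_string (key_string : String) (out : String) : Prop := out = order_key_string_alt key_string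
instance (key_string : String) (out : String) : Decidable (Spec_order_key_string key_string out) := by unfold Spec_order_key_string; infer_instance

-- ===== CLAIM (what is proved, stated in full; the proofs are below) =====
def Claim_equal_order_key_string : Prop := ∀ (key_string : String), Dom_order_key_string key_string → Spec_order_key_string key_string (order_key_string key_string)

-- ===== LEMMAS AND PROOFS =====

-- A's partition loop yields (modifiers in order, keys in order) = the two filters
theorem foldl_partition (p : String → Bool) (xs a b : List String) :
    xs.foldl (fun (acc : List String × List String) key =>
      if p key then (acc.1 ++ [key], acc.2)
      else (acc.1, acc.2 ++ [key])) (a, b)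
    = (a ++ xs.filter p, b ++ xs.filter (fun k => !p k)) := by
  induction xs generalizing a b with
  | nil => simp
  | cons x xs ih =>
    simp only [List.foldl_cons, List.filter_cons]
    cases h : p x
    · simp [ih]
    · simp [h, ih]

-- emitting keys of a ≤-sorted list count-many times each gives a ≤-sorted list
theorem pairwise_flatMap_replicate (ms : List String) (f : String → Nat)
    (h : ms.Pairwise (· ≤ ·)) :
    (ms.flatMap (fun m => List.replicate (f m) m)).Pairwise (· ≤ ·) := by
  induction ms with
  | nil => simp
  | cons m ms ih =>
    rcases List.pairwise_cons.mp h with ⟨hm, hms⟩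
    simp only [List.flatMap_cons]
    refine List.pairwise_append.mpr ⟨?_, ih hms, ?_⟩
    · exact List.pairwise_replicate.mpr (Or.inr (le_refl _))
    · intro x hx y hy
      rw [List.eq_of_mem_replicate hx]
      rcases List.mem_flatMap.mp hy with ⟨m', hm', hy'⟩
      rw [List.eq_of_mem_replicate hy']
      exact hm m' hm'

-- sorting the modifier occurrences = emitting each modifier, in sorted order, count-many times
theorem sorted_mods (xs : List String) :
    PySem.List.sorted (xs.filter (fun k => MODIFIERS.contains k)) (fun x => x) false
    = SORTED_MODS.flatMap (fun m => List.replicate (PySem.List.count xs m) m) := by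
  apply PySem.List.sorted_id_eq_of_perm_of_pairwise
  · rw [List.perm_iff_count]
    intro v
    have hc : List.count v (xs.filter (fun k => MODIFIERS.contains k))
        = if MODIFIERS.contains v then xs.count v else 0 := by
      by_cases h : MODIFIERS.contains v = true
      · rw [List.count_filter h, if_pos h]
      · rw [if_neg h, List.count_eq_zero]
        intro hv; exact h (List.of_mem_filter hv)
    rw [hc]
    simp only [SORTED_MODS, List.flatMap_cons, List.flatMap_nil, List.count_append,
      List.count_replicate, List.count_nil, PySem.List.count]
    by_cases h : v ∈ MODIFIERS
    · have hv : MODIFIERS.contains v = true := by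
        rw [List.contains_eq_mem, decide_eq_true_eq]; exact h
      rw [if_pos hv]
      simp only [ MODIFIERS, List.mem_cons, List.not_mem_nil, or_false] at h
      rcases h with rfl | rfl | rfl | rfl <;> simp
    · have hv : ¬ MODIFIERS.contains v = true := by
        rw [List.contains_eq_mem, decide_eq_true_eq]; exact h
      rw [if_neg hv]
      simp only [ MODIFIERS, List.mem_cons, List.not_mem_nil, or_false, not_or] at h
      obtain ⟨n1, n2, n3, n4⟩ := h
      simp [beq_iff_eq, Ne.symm n1, Ne.symm n2, Ne.symm n3, Ne.symm n4]
  · apply pairwise_flatMap_replicate _ _ ?_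
    simp only [SORTED_MODS, List.pairwise_cons, List.forall_mem_cons, List.Pairwise.nil, and_true, String.le_iff_toList_le]
    refine ⟨⟨?_, ?_, ?_⟩, ⟨?_, ?_⟩, ?_⟩ <;> decide

-- ===== VERDICT (by name: the statement is the Claim_ definition above) =====
theorem order_key_string_spec : Claim_equal_order_key_string := by
  intro key_string _
  unfold Spec_order_key_string order_key_string order_key_string_alt
  set xs := (PySem.Str.split? key_string "+").getD [] with hxs
  -- the two preprocessing blocks compute the same list
  have hprep :
      (match PySem.List.index? xs "" with
       | none => xs
       | some i =>
         let ys := xs.set i "+"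
         match PySem.List.remove? ys "" with
         | none => ys
         | some zs => zs)
      = (if xs.contains "" then
           let i := (PySem.List.index? xs "").getD 0
           let ys := xs.set i "+"
           if ys.contains "" then (PySem.List.remove? ys "").getD ys else ys
         else xs) := by
    rcases hidx : PySem.List.index? xs "" with _ | i
    · have h1 : ¬ ("" ∈ xs) := (PySem.List.index?_eq_none_iff _ _).mp hidx
      rw [if_neg (by simp [h1])]
    · have hmem : "" ∈ xs :=
        (PySem.List.index?_isSome_iff _ _).mp (by simp only [hidx, Option.isSome_some])
      rw [if_pos (by simp [hmem])]
      simp only [Option.getD_some]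
      rcases hrem : PySem.List.remove? (xs.set i "+") "" with _ | zs
      · have h2 : ¬ ("" ∈ xs.set i "+") := (PySem.List.remove?_eq_none_iff _ _).mp hrem
        rw [if_neg (by simp [h2])]
      · have h3 : "" ∈ xs.set i "+" := by
          by_contra h
          rw [(PySem.List.remove?_eq_none_iff _ _).mpr h] at hrem
          simp at hrem
        rw [if_pos (by simp [h3])]
        simp only [Option.getD_some]
  simp only [hprep, foldl_partition, List.nil_append, sorted_mods]
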